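-- pv_equiv track=rewrite | github.com/Daeho-Son/PS | 프로그래머스/lv2/258711. 도넛과 막대 그래프/solution.py | get_graph_type
-- ===== SOURCE A (Python) =====
-- from enum import Enum
--
-- class GraphType(Enum):
--     DOUGHNUT = 1
--     STICK = 2
--     FIGURE_OF_EIGHT = 3
--
-- def get_graph_type(edge_frequency, start_edge):
--     queue = [start_edge]
--     linked_edges = set()
--     linked_count = -1
--     while queue:
--         from_edge = queue.pop()
--         linked_edges.add(from_edge)
--         linked_count += 1
--         if from_edge in edge_frequency.keys():
--             queue.extend(edge_frequency.get(from_edge))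
--             edge_frequency.pop(from_edge)
--     edge_count = len(linked_edges)
--     if edge_count == linked_count:
--         return GraphType.DOUGHNUT.value
--     if edge_count == linked_count + 1:
--         return GraphType.STICK.value
--     if edge_count == linked_count - 1:
--         return GraphType.FIGURE_OF_EIGHT.value
--     return 0
-- ===== SOURCE B (Python) =====
-- def get_graph_type(edge_frequency, start_edge):
--     # Fixpoint saturation instead of a stack traversal: repeatedly sweep the
--     # whole dict, activating any key that already lies in the node set, until
--     # a full sweep activates nothing.  (Does not mutate edge_frequency; A pops
--     # reachable keys out of it, so equality is about the return value.)
--     reached = set()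
--     nodes = {start_edge}
--     edge_total = 0
--     changed = True
--     while changed:
--         changed = False
--         for key in edge_frequency:
--             if key not in reached and key in nodes:
--                 nbrs = edge_frequency[key]
--                 reached.add(key)
--                 nodes.update(nbrs)
--                 edge_total += len(nbrs)
--                 changed = True
--     node_count = len(nodes)
--     if node_count == edge_total:
--         return 1
--     if node_count == edge_total + 1:
--         return 2
--     if node_count == edge_total - 1:
--         return 3
--     return 0
-- ===== Notes on version B (the rewrite author's own statement) =====
-- stated objective: alternative
-- what changed: A runs a destructive stack traversal, popping reachable keys out of the dict and counting stack pops; B never traverses with a stack at all: it computes the reachable key set by fixpoint saturation (repeated whole-dict sweeps until no new key activates), summing out-degrees of activated keys and collecting nodes as it goes.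
import Mathlib
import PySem

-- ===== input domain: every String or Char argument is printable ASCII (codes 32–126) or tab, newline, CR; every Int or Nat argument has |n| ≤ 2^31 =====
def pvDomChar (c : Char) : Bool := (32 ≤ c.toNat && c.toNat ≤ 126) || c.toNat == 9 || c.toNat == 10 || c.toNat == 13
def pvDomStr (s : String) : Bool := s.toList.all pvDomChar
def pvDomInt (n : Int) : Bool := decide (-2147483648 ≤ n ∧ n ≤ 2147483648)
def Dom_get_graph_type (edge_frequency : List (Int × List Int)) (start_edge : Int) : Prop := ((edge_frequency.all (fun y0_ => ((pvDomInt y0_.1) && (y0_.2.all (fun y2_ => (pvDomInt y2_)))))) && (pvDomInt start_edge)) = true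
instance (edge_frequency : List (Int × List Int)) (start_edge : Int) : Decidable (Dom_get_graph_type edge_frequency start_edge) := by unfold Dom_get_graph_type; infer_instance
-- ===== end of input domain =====

-- B replaces A's destructive stack traversal by fixpoint saturation (repeated whole-dict
-- sweeps until no new key activates); A pops reachable keys out of its dict argument while
-- B leaves it intact — the equivalence is about the return value.

-- ===== PORT A =====

-- weight used by the termination measure of A's while-loop
def pvW (l : List (Int × List Int)) : Nat := (l.map (fun p => p.2.length + 1)).sum

-- termination helper: queue.pop() splits off the last element
theorem pv_pop?_eq_some {α : Type} {q r : List α} {x : α}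
    (h : PySem.List.pop? q = some (x, r)) : q = r ++ [x] := by
  rcases List.eq_nil_or_concat q with rfl | ⟨l, y, rfl⟩
  · simp [PySem.List.pop?, PySem.List.pyIdx?] at h
  · have hlen : (l.concat y).length = l.length + 1 := by simp
    rw [PySem.List.pop?, PySem.List.pyIdx?] at h
    rw [hlen] at h
    norm_num at h
    rw [List.eraseIdx_append_of_length_le (by omega)] at h
    simp only [List.concat_eq_append]
    simp at h
    simp [← h.1, ← h.2]

-- a filtered list never weighs more
theorem pvW_filter_le (l : List (Int × List Int)) (q : (Int × List Int) → Bool) :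
    pvW (l.filter q) ≤ pvW l := by
  induction l with
  | nil => simp [pvW]
  | cons p t ih =>
    by_cases h : q p = true
    · simp [pvW, List.filter_cons, h] at *; omega
    · simp only [pvW, List.filter_cons, h] at *; simp at *; omega

-- termination helper: popping a present key strictly shrinks the weight
theorem pvW_erase_le (d : PySem.Dict Int (List Int)) (x : Int) (nbrs : List Int)
    (h : d.get? x = some nbrs) :
    pvW (d.erase x).items + (nbrs.length + 1) ≤ pvW d.items := by
  obtain ⟨l⟩ := d
  induction l with
  | nil => simp [PySem.Dict.get?] at h
  | cons p t ih =>
    rw [PySem.Dict.get?_mk_cons] at h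
    by_cases hk : (p.1 == x) = true
    · rw [if_pos hk] at h
      injection h with h; subst h
      have := pvW_filter_le t (fun p => !(p.1 == x))
      simp [PySem.Dict.erase, List.filter_cons, hk, pvW] at *
      omega
    · rw [if_neg hk] at h
      have := ih h
      simp [PySem.Dict.erase, List.filter_cons, hk, pvW] at *
      omega

-- the while-loop of A: pop from the stack end, count every pop, pop consumed keys from the dict
def ggLoopA (d : PySem.Dict Int (List Int)) (queue : List Int)
    (linked_edges : PySem.Set Int) (linked_count : Int) : PySem.Set Int × Int :=
  match hp : PySem.List.pop? queue with
  | none => (linked_edges, linked_count)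
  | some (from_edge, queue') =>
    let linked_edges' := PySem.Set.add linked_edges from_edge
    let linked_count' := linked_count + 1
    if hc : d.contains from_edge = true then
      ggLoopA (d.erase from_edge) (queue' ++ (d.get? from_edge).getD []) linked_edges' linked_count'
    else
      ggLoopA d queue' linked_edges' linked_count'
termination_by queue.length + pvW d.items
decreasing_by
  · have hq := pv_pop?_eq_some hp
    rw [PySem.Dict.contains_eq_isSome_get?] at hc
    obtain ⟨nbrs, hg⟩ := Option.isSome_iff_exists.mp hc
    have hle := pvW_erase_le d from_edge nbrs hg
    subst hq
    simp [hg]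
    omega
  · have hq := pv_pop?_eq_some hp
    subst hq
    simp

def get_graph_type (edge_frequency : List (Int × List Int)) (start_edge : Int) : Int :=
  let r := ggLoopA (PySem.Dict.mk edge_frequency) [start_edge] PySem.Set.empty (-1)
  let edge_count : Int := PySem.Set.len r.1
  let linked_count : Int := r.2
  if edge_count = linked_count then 1
  else if edge_count = linked_count + 1 then 2
  else if edge_count = linked_count - 1 then 3
  else 0

-- ===== PORT B =====

-- body of B's inner 'for key in edge_frequency' sweep: state (reached, nodes, edge_total, changed)
def ggStepB (ef : PySem.Dict Int (List Int))
    (st : PySem.Set Int × PySem.Set Int × Int × Bool) (key : Int) :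
    PySem.Set Int × PySem.Set Int × Int × Bool :=
  if !(PySem.Set.contains st.1 key) && PySem.Set.contains st.2.1 key then
    let nbrs := (ef.get? key).getD []
    (PySem.Set.add st.1 key, PySem.Set.update st.2.1 nbrs, st.2.2.1 + nbrs.length, true)
  else st

-- one full sweep over the dict's keys
def ggPassB (ef : PySem.Dict Int (List Int)) (l : List Int)
    (st : PySem.Set Int × PySem.Set Int × Int × Bool) :
    PySem.Set Int × PySem.Set Int × Int × Bool :=
  l.foldl (ggStepB ef) st

-- termination helper: a sweep only grows the reached set
theorem pvB_reached_mono (ef : PySem.Dict Int (List Int)) (l : List Int)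
    (st : PySem.Set Int × PySem.Set Int × Int × Bool) (x : Int)
    (h : PySem.Set.contains st.1 x = true) :
    PySem.Set.contains (ggPassB ef l st).1 x = true := by
  induction l generalizing st with
  | nil => exact h
  | cons k t ih =>
    simp only [ggPassB, List.foldl_cons] at *
    apply ih
    unfold ggStepB
    split
    · rw [PySem.Set.contains_iff] at h ⊢
      exact (PySem.Set.mem_add _ _ _).mpr (Or.inl h)
    · exact h

-- termination helper: if a sweep reports a change, some key left the unreached set
theorem pvB_changed_src (ef : PySem.Dict Int (List Int)) (l : List Int)
    (st : PySem.Set Int × PySem.Set Int × Int × Bool)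
    (h : (ggPassB ef l st).2.2.2 = true) :
    st.2.2.2 = true ∨ ∃ k ∈ l, PySem.Set.contains st.1 k = false ∧
      PySem.Set.contains (ggPassB ef l st).1 k = true := by
  induction l generalizing st with
  | nil => exact Or.inl h
  | cons k t ih =>
    simp only [ggPassB, List.foldl_cons] at *
    rcases ih (ggStepB ef st k) h with hch | ⟨k', hk', h1, h2⟩
    · unfold ggStepB at hch
      by_cases hg : (!(PySem.Set.contains st.1 k) && PySem.Set.contains st.2.1 k) = true
      · right
        refine ⟨k, by simp, by simp at hg; simp [hg.1], ?_⟩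
        apply pvB_reached_mono
        unfold ggStepB
        rw [if_pos hg]
        rw [PySem.Set.contains_iff]
        exact (PySem.Set.mem_add _ _ _).mpr (Or.inr rfl)
      · rw [if_neg hg] at hch
        exact Or.inl hch
    · by_cases hg : PySem.Set.contains st.1 k' = true
      · -- k' was reached before the step: contradiction with h1 unless step added it, i.e. k' = k
        unfold ggStepB at h1
        by_cases hg2 : (!(PySem.Set.contains st.1 k) && PySem.Set.contains st.2.1 k) = true
        · rw [if_pos hg2] at h1
          simp only at h1
          rw [PySem.Set.contains_iff] at hg
          have : k' ∈ PySem.Set.add st.1 k := (PySem.Set.mem_add _ _ _).mpr (Or.inl hg)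
          rw [← PySem.Set.contains_iff] at this
          rw [this] at h1; cases h1
        · rw [if_neg hg2] at h1; rw [hg] at h1; cases h1
      · right
        exact ⟨k', by simp [hk'], by simpa using hg, h2⟩

-- termination helper: a pointwise-stronger filter that loses a present element is shorter
theorem pv_filter_lt {α : Type} (l : List α) (P Q : α → Bool)
    (himp : ∀ x, Q x = true → P x = true) (x : α) (hx : x ∈ l)
    (hP : P x = true) (hQ : Q x = false) :
    (l.filter Q).length < (l.filter P).length := by
  have hsub : List.Sublist (l.filter Q) (l.filter P) := List.monotone_filter_right l (fun a ha => himp a ha)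
  rcases lt_or_eq_of_le hsub.length_le with hlt | heq
  · exact hlt
  · exfalso
    have heql := hsub.eq_of_length heq
    have hxP : x ∈ l.filter P := List.mem_filter.mpr ⟨hx, hP⟩
    rw [← heql] at hxP
    have := (List.mem_filter.mp hxP).2
    rw [hQ] at this; cases this

-- the while-changed loop of B: sweep, and repeat while the sweep changed something
def ggSatB (ef : PySem.Dict Int (List Int)) (reached nodes : PySem.Set Int) (e : Int) :
    PySem.Set Int × Int :=
  if h : (ggPassB ef ef.keys (reached, nodes, e, false)).2.2.2 = true then
    ggSatB ef (ggPassB ef ef.keys (reached, nodes, e, false)).1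
      (ggPassB ef ef.keys (reached, nodes, e, false)).2.1
      (ggPassB ef ef.keys (reached, nodes, e, false)).2.2.1
  else ((ggPassB ef ef.keys (reached, nodes, e, false)).2.1,
        (ggPassB ef ef.keys (reached, nodes, e, false)).2.2.1)
termination_by ((ef.keys).filter (fun k => !(PySem.Set.contains reached k))).length
decreasing_by
  rcases pvB_changed_src ef ef.keys (reached, nodes, e, false) h with hch | ⟨k, hk, h1, h2⟩
  · cases hch
  · apply pv_filter_lt ef.keys _ _ _ k hk
    · have h1' : PySem.Set.contains reached k = false := h1
      rw [h1']; rfl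
    · have h2' : PySem.Set.contains (ggPassB ef ef.keys (reached, nodes, e, false)).1 k = true := h2
      rw [h2']; rfl
    · intro x hx
      simp only [Bool.not_eq_eq_eq_not, Bool.not_true] at hx ⊢
      by_cases hr : PySem.Set.contains (reached, nodes, e, false).1 x = true
      · have := pvB_reached_mono ef ef.keys (reached, nodes, e, false) x hr
        rw [this] at hx; cases hx
      · simpa using hr

def get_graph_type_alt (edge_frequency : List (Int × List Int)) (start_edge : Int) : Int :=
  let r := ggSatB (PySem.Dict.mk edge_frequency) PySem.Set.empty
            (PySem.Set.add PySem.Set.empty start_edge) 0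
  let node_count : Int := PySem.Set.len r.1
  let edge_total : Int := r.2
  if node_count = edge_total then 1
  else if node_count = edge_total + 1 then 2
  else if node_count = edge_total - 1 then 3
  else 0

-- ===== PRECONDITION & SPEC =====
def Spec_get_graph_type (edge_frequency : List (Int × List Int)) (start_edge : Int) (out : Int) : Prop := out = get_graph_type_alt edge_frequency start_edge
instance (edge_frequency : List (Int × List Int)) (start_edge : Int) (out : Int) : Decidable (Spec_get_graph_type edge_frequency start_edge out) := by unfold Spec_get_graph_type; infer_instance

-- ===== CLAIM (what is proved, stated in full; the proofs are below) =====
def Claim_equal_get_graph_type : Prop := ∀ (edge_frequency : List (Int × List Int)) (start_edge : Int), Dom_get_graph_type edge_frequency start_edge → Spec_get_graph_type edge_frequency start_edge (get_graph_type edge_frequency start_edge)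

-- ===== LEMMAS AND PROOFS =====

-- reachability through dict d from the source list q
inductive PvRF (d : PySem.Dict Int (List Int)) (q : List Int) : Int → Prop
  | base (x : Int) : x ∈ q → PvRF d q x
  | step (j x : Int) (ns : List Int) : PvRF d q j → d.get? j = some ns → x ∈ ns → PvRF d q x

-- total out-degree of a list of keys
def pvESum (d : PySem.Dict Int (List Int)) (K : List Int) : Int :=
  (K.map (fun k => (((d.get? k).getD []).length : Int))).sum

theorem pvRF_nil (d : PySem.Dict Int (List Int)) (x : Int) : ¬ PvRF d [] x := by
  intro h
  induction h with
  | base y hy => cases hy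
  | step j y ns _ _ _ ih => exact ih

theorem pvRF_mono_src (d : PySem.Dict Int (List Int)) {q q' : List Int}
    (hq : ∀ y, y ∈ q → y ∈ q') {x : Int} (h : PvRF d q x) : PvRF d q' x := by
  induction h with
  | base y hy => exact PvRF.base y (hq y hy)
  | step j y ns _ hg hm ih => exact PvRF.step j y ns ih hg hm

theorem pv_get?_erase_aux (k x : Int) (l : List (Int × List Int)) :
    (PySem.Dict.mk (l.filter (fun p => !(p.1 == k)))).get? x
      = if x = k then none else (PySem.Dict.mk l).get? x := by
  induction l with
  | nil =>
    by_cases h : x = k <;> simp [h, PySem.Dict.get?]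
  | cons p t ih =>
    rw [List.filter_cons]
    by_cases hpk : (p.1 == k) = true
    · have hpk' : p.1 = k := by simpa using hpk
      simp only [hpk, Bool.not_true, Bool.false_eq_true, reduceIte]
      rw [ih, PySem.Dict.get?_mk_cons]
      by_cases hxk : x = k
      · simp [hxk]
      · have hne : (p.1 == x) = false := by
          subst hpk'; simp; intro h; exact hxk h.symm
        simp [hne, hxk]
    · simp only [hpk, Bool.not_false, if_pos]
      rw [PySem.Dict.get?_mk_cons, PySem.Dict.get?_mk_cons, ih]
      by_cases hpx : (p.1 == x) = true
      · have hxk : ¬ x = k := by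
          intro h; subst h; exact hpk hpx
        simp [hpx, hxk]
      · simp [hpx]

theorem pv_get?_erase (d : PySem.Dict Int (List Int)) (k x : Int) :
    (d.erase k).get? x = if x = k then none else d.get? x := by
  obtain ⟨l⟩ := d
  exact pv_get?_erase_aux k x l

theorem pv_contains_erase (d : PySem.Dict Int (List Int)) (k x : Int) :
    (d.erase k).contains x = (!(x == k) && d.contains x) := by
  rw [PySem.Dict.contains_eq_isSome_get?, PySem.Dict.contains_eq_isSome_get?, pv_get?_erase]
  by_cases h : x = k <;> simp [h]

theorem pvRF_consume_from (d : PySem.Dict Int (List Int)) (j : Int) (nbrs q' : List Int)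
    (hg : d.get? j = some nbrs) {x : Int}
    (h : PvRF (d.erase j) (q' ++ nbrs) x) : PvRF d (q' ++ [j]) x := by
  induction h with
  | base y hy =>
    rcases List.mem_append.mp hy with hy' | hy'
    · exact PvRF.base y (List.mem_append.mpr (Or.inl hy'))
    · exact PvRF.step j y nbrs (PvRF.base j (by simp)) hg hy'
  | step j' y ns _ hg' hm ih =>
    rw [pv_get?_erase] at hg'
    by_cases hjj : j' = j
    · simp [hjj] at hg'
    · rw [if_neg hjj] at hg'
      exact PvRF.step j' y ns ih hg' hm

theorem pvRF_consume_to (d : PySem.Dict Int (List Int)) (j : Int) (nbrs q' : List Int)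
    (hg : d.get? j = some nbrs) {x : Int}
    (h : PvRF d (q' ++ [j]) x) : x = j ∨ PvRF (d.erase j) (q' ++ nbrs) x := by
  induction h with
  | base y hy =>
    rcases List.mem_append.mp hy with hy' | hy'
    · exact Or.inr (PvRF.base y (List.mem_append.mpr (Or.inl hy')))
    · simp at hy'; exact Or.inl hy'
  | step j' y ns _ hg' hm ih =>
    by_cases hjj : j' = j
    · subst hjj
      rw [hg] at hg'
      injection hg' with hg'
      subst hg'
      exact Or.inr (PvRF.base y (List.mem_append.mpr (Or.inr hm)))
    · rcases ih with rfl | ih'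
      · exact absurd rfl hjj
      · refine Or.inr (PvRF.step j' y ns ih' ?_ hm)
        rw [pv_get?_erase, if_neg hjj]
        exact hg'

theorem pvRF_skip_to (d : PySem.Dict Int (List Int)) (j : Int) (q' : List Int)
    (hc : d.contains j = false) {x : Int}
    (h : PvRF d (q' ++ [j]) x) : x = j ∨ PvRF d q' x := by
  induction h with
  | base y hy =>
    rcases List.mem_append.mp hy with hy' | hy'
    · exact Or.inr (PvRF.base y hy')
    · simp at hy'; exact Or.inl hy'
  | step j' y ns _ hg' hm ih =>
    rcases ih with rfl | ih'
    · rw [PySem.Dict.contains_eq_isSome_get?, hg'] at hc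
      cases hc
    · exact Or.inr (PvRF.step j' y ns ih' hg' hm)

-- step equations of A's loop
theorem ggLoopA_none {d : PySem.Dict Int (List Int)} {queue : List Int} {s : PySem.Set Int} {c : Int}
    (h : PySem.List.pop? queue = none) : ggLoopA d queue s c = (s, c) := by
  rw [ggLoopA]; split <;> simp_all

theorem ggLoopA_pos {d : PySem.Dict Int (List Int)} {queue q' : List Int} {x : Int} {s : PySem.Set Int} {c : Int}
    (h : PySem.List.pop? queue = some (x, q')) (hc : d.contains x = true) :
    ggLoopA d queue s c
      = ggLoopA (d.erase x) (q' ++ (d.get? x).getD []) (PySem.Set.add s x) (c + 1) := by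
  rw [ggLoopA]; split <;> simp_all

theorem ggLoopA_neg {d : PySem.Dict Int (List Int)} {queue q' : List Int} {x : Int} {s : PySem.Set Int} {c : Int}
    (h : PySem.List.pop? queue = some (x, q')) (hc : d.contains x = false) :
    ggLoopA d queue s c = ggLoopA d q' (PySem.Set.add s x) (c + 1) := by
  rw [ggLoopA]; split <;> simp_all

theorem pv_pop?_eq_none {α : Type} {q : List α}
    (h : PySem.List.pop? q = none) : q = [] := by
  rcases List.eq_nil_or_concat q with rfl | ⟨l, y, rfl⟩
  · rfl
  · rw [PySem.List.pop?, PySem.List.pyIdx?] at h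
    simp at h

-- characterization of A's loop: node set = sources ∪ reachable, count = pops − start offset
theorem pv_loopA_char (n : Nat) (d : PySem.Dict Int (List Int)) (q : List Int)
    (s : PySem.Set Int) (c : Int)
    (hm : q.length + pvW d.items ≤ n) (hs : s.Nodup) :
    (ggLoopA d q s c).1.Nodup ∧
    (∀ x, x ∈ (ggLoopA d q s c).1 ↔ x ∈ s ∨ PvRF d q x) ∧
    ∃ K : List Int, K.Nodup ∧ (∀ k, k ∈ K ↔ d.contains k = true ∧ PvRF d q k) ∧
      (ggLoopA d q s c).2 = c + q.length + pvESum d K := by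
  induction n generalizing d q s c with
  | zero =>
    have hq : q = [] := List.length_eq_zero_iff.mp (by omega)
    subst hq
    rw [ggLoopA_none rfl]
    refine ⟨hs, fun x => by simpa using fun h => absurd h (pvRF_nil d x), [], by simp, ?_, by simp [pvESum]⟩
    intro k
    simp
    rintro - h
    exact pvRF_nil d k h
  | succ n ih =>
    cases hpo : PySem.List.pop? q with
    | none =>
      have hq : q = [] := pv_pop?_eq_none hpo
      subst hq
      rw [ggLoopA_none rfl]
      refine ⟨hs, fun x => by simpa using fun h => absurd h (pvRF_nil d x), [], by simp, ?_, by simp [pvESum]⟩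
      intro k
      simp
      rintro - h
      exact pvRF_nil d k h
    | some p =>
      obtain ⟨j, q'⟩ := p
      have hq : q = q' ++ [j] := pv_pop?_eq_some hpo
      subst hq
      by_cases hc : d.contains j = true
      · -- consume j
        have hgs : (d.get? j).isSome = true := by
          rw [← PySem.Dict.contains_eq_isSome_get?]; exact hc
        obtain ⟨nbrs, hg⟩ := Option.isSome_iff_exists.mp hgs
        rw [ggLoopA_pos hpo hc, hg]
        simp only [Option.getD_some]
        have hle := pvW_erase_le d j nbrs hg
        have hm' : (q' ++ nbrs).length + pvW (d.erase j).items ≤ n := by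
          simp only [List.length_append] at hm ⊢
          simp at hm
          omega
        obtain ⟨hN, hS, K', hKnd, hKmem, hsum⟩ :=
          ih (d.erase j) (q' ++ nbrs) (PySem.Set.add s j) (c + 1) hm'
            (PySem.Set.nodup_add _ _ hs)
        refine ⟨hN, ?_, j :: K', ?_, ?_, ?_⟩
        · intro x
          rw [hS x, PySem.Set.mem_add]
          constructor
          · rintro ((hx | rfl) | hrf)
            · exact Or.inl hx
            · exact Or.inr (PvRF.base x (by simp))
            · exact Or.inr (pvRF_consume_from d j nbrs q' hg hrf)
          · rintro (hx | hrf)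
            · exact Or.inl (Or.inl hx)
            · rcases pvRF_consume_to d j nbrs q' hg hrf with rfl | h'
              · exact Or.inl (Or.inr rfl)
              · exact Or.inr h'
        · refine List.nodup_cons.mpr ⟨?_, hKnd⟩
          intro hmem
          have := ((hKmem j).mp hmem).1
          rw [pv_contains_erase] at this
          simp at this
        · intro k
          constructor
          · intro hk
            rcases List.mem_cons.mp hk with rfl | hk'
            · exact ⟨hc, PvRF.base k (by simp)⟩
            · obtain ⟨hck, hrf⟩ := (hKmem k).mp hk'
              rw [pv_contains_erase] at hck
              simp only [Bool.and_eq_true, Bool.not_eq_eq_eq_not, Bool.not_true, beq_eq_false_iff_ne] at hck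
              exact ⟨hck.2, pvRF_consume_from d j nbrs q' hg hrf⟩
          · rintro ⟨hck, hrf⟩
            by_cases hkj : k = j
            · exact List.mem_cons.mpr (Or.inl hkj)
            · refine List.mem_cons.mpr (Or.inr ((hKmem k).mpr ⟨?_, ?_⟩))
              · rw [pv_contains_erase]
                simp [hkj, hck]
              · rcases pvRF_consume_to d j nbrs q' hg hrf with rfl | h'
                · exact absurd rfl hkj
                · exact h'
        · rw [hsum]
          have hsum' : pvESum (d.erase j) K' = pvESum d K' := by
            unfold pvESum
            congr 1
            apply List.map_congr_left
            intro k hk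
            have hck := ((hKmem k).mp hk).1
            rw [pv_contains_erase] at hck
            simp only [Bool.and_eq_true, Bool.not_eq_eq_eq_not, Bool.not_true, beq_eq_false_iff_ne] at hck
            rw [pv_get?_erase, if_neg hck.1]
          rw [hsum']
          unfold pvESum
          simp only [List.map_cons, List.sum_cons, hg, Option.getD_some, List.length_append,
            List.length_cons, List.length_nil]
          push_cast
          ring
      · -- skip j
        rw [ggLoopA_neg hpo (by simpa using hc)]
        have hm' : q'.length + pvW d.items ≤ n := by
          simp at hm; omega
        obtain ⟨hN, hS, K', hKnd, hKmem, hsum⟩ :=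
          ih d q' (PySem.Set.add s j) (c + 1) hm' (PySem.Set.nodup_add _ _ hs)
        have hc' : d.contains j = false := by simpa using hc
        refine ⟨hN, ?_, K', hKnd, ?_, ?_⟩
        · intro x
          rw [hS x, PySem.Set.mem_add]
          constructor
          · rintro ((hx | rfl) | hrf)
            · exact Or.inl hx
            · exact Or.inr (PvRF.base x (by simp))
            · exact Or.inr (pvRF_mono_src d (fun y hy => by simp [hy]) hrf)
          · rintro (hx | hrf)
            · exact Or.inl (Or.inl hx)
            · rcases pvRF_skip_to d j q' hc' hrf with rfl | h'
              · exact Or.inl (Or.inr rfl)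
              · exact Or.inr h'
        · intro k
          rw [hKmem k]
          constructor
          · rintro ⟨hck, hrf⟩
            exact ⟨hck, pvRF_mono_src d (fun y hy => by simp [hy]) hrf⟩
          · rintro ⟨hck, hrf⟩
            rcases pvRF_skip_to d j q' hc' hrf with rfl | h'
            · rw [hck] at hc'; cases hc'
            · exact ⟨hck, h'⟩
        · rw [hsum]
          simp
          ring

-- B-side invariant
def pvGoodB (ef : PySem.Dict Int (List Int)) (start : Int)
    (r nd : PySem.Set Int) (e : Int) : Prop :=
  r.Nodup ∧ nd.Nodup ∧
  (∀ k ∈ r, ef.contains k = true ∧ PvRF ef [start] k) ∧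
  (∀ x, x ∈ nd ↔ x = start ∨ ∃ k ∈ r, x ∈ (ef.get? k).getD []) ∧
  e = pvESum ef r

theorem pvStepB_good (ef : PySem.Dict Int (List Int)) (start : Int)
    (st : PySem.Set Int × PySem.Set Int × Int × Bool) (key : Int)
    (hkey : ef.contains key = true)
    (h : pvGoodB ef start st.1 st.2.1 st.2.2.1) :
    pvGoodB ef start (ggStepB ef st key).1 (ggStepB ef st key).2.1 (ggStepB ef st key).2.2.1 := by
  obtain ⟨hr, hn, hrk, hnc, he⟩ := h
  unfold ggStepB
  by_cases hg : (!(PySem.Set.contains st.1 key) && PySem.Set.contains st.2.1 key) = true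
  · rw [if_pos hg]
    simp only [Bool.and_eq_true, Bool.not_eq_eq_eq_not, Bool.not_true] at hg
    have hnotmem : key ∉ st.1 := by
      rw [← PySem.Set.contains_iff, hg.1]; simp
    have hinN : key ∈ st.2.1 := (PySem.Set.contains_iff _ _).mp hg.2
    have hRFkey : PvRF ef [start] key := by
      rcases (hnc key).mp hinN with rfl | ⟨k0, hk0, hmem⟩
      · exact PvRF.base key (by simp)
      · obtain ⟨hck0, hrfk0⟩ := hrk k0 hk0
        have : (ef.get? k0).isSome = true := by
          rw [← PySem.Dict.contains_eq_isSome_get?]; exact hck0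
        obtain ⟨ns, hg0⟩ := Option.isSome_iff_exists.mp this
        rw [hg0] at hmem
        exact PvRF.step k0 key ns hrfk0 hg0 hmem
    refine ⟨PySem.Set.nodup_add _ _ hr, PySem.Set.nodup_update _ _ hn, ?_, ?_, ?_⟩
    · intro k hk
      rcases (PySem.Set.mem_add _ _ _).mp hk with hk' | rfl
      · exact hrk k hk'
      · exact ⟨hkey, hRFkey⟩
    · intro x
      rw [PySem.Set.mem_update, hnc x]
      constructor
      · rintro ((rfl | ⟨k0, hk0, hmem⟩) | hx)
        · exact Or.inl rfl
        · exact Or.inr ⟨k0, (PySem.Set.mem_add _ _ _).mpr (Or.inl hk0), hmem⟩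
        · exact Or.inr ⟨key, (PySem.Set.mem_add _ _ _).mpr (Or.inr rfl), hx⟩
      · rintro (rfl | ⟨k0, hk0, hmem⟩)
        · exact Or.inl (Or.inl rfl)
        · rcases (PySem.Set.mem_add _ _ _).mp hk0 with hk0' | rfl
          · exact Or.inl (Or.inr ⟨k0, hk0', hmem⟩)
          · exact Or.inr hmem
    · have hadd : PySem.Set.add st.1 key = st.1 ++ [key] := by
        unfold PySem.Set.add
        rw [hg.1]
        simp
      simp only
      rw [hadd]
      unfold pvESum at he ⊢
      rw [List.map_append, List.sum_append, he]
      simp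
  · rw [if_neg hg]
    exact ⟨hr, hn, hrk, hnc, he⟩

theorem pvPassB_good (ef : PySem.Dict Int (List Int)) (start : Int) (l : List Int)
    (hl : ∀ k ∈ l, ef.contains k = true)
    (st : PySem.Set Int × PySem.Set Int × Int × Bool)
    (h : pvGoodB ef start st.1 st.2.1 st.2.2.1) :
    pvGoodB ef start (ggPassB ef l st).1 (ggPassB ef l st).2.1 (ggPassB ef l st).2.2.1 := by
  induction l generalizing st with
  | nil => exact h
  | cons k t ih =>
    simp only [ggPassB, List.foldl_cons] at *
    exact ih (fun k' hk' => hl k' (by simp [hk'])) _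
      (pvStepB_good ef start st k (hl k (by simp)) h)

-- the changed flag never resets during a sweep
theorem pvB_changed_keep (ef : PySem.Dict Int (List Int)) (l : List Int)
    (st : PySem.Set Int × PySem.Set Int × Int × Bool)
    (h : st.2.2.2 = true) : (ggPassB ef l st).2.2.2 = true := by
  induction l generalizing st with
  | nil => exact h
  | cons k t ih =>
    simp only [ggPassB, List.foldl_cons] at *
    apply ih
    unfold ggStepB
    split
    · rfl
    · exact h

-- a sweep that reports no change did nothing, and no key could fire
theorem pvPassB_stable (ef : PySem.Dict Int (List Int)) (l : List Int)
    (st : PySem.Set Int × PySem.Set Int × Int × Bool)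
    (h : (ggPassB ef l st).2.2.2 = false) :
    ggPassB ef l st = st ∧
    ∀ k ∈ l, ¬(PySem.Set.contains st.1 k = false ∧ PySem.Set.contains st.2.1 k = true) := by
  induction l generalizing st with
  | nil => exact ⟨rfl, by simp⟩
  | cons k t ih =>
    simp only [ggPassB, List.foldl_cons] at *
    by_cases hg : (!(PySem.Set.contains st.1 k) && PySem.Set.contains st.2.1 k) = true
    · exfalso
      have : (ggStepB ef st k).2.2.2 = true := by
        unfold ggStepB; rw [if_pos hg]
      have hkp := pvB_changed_keep ef t _ this
      simp only [ggPassB] at hkp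
      rw [hkp] at h; cases h
    · have hstep : ggStepB ef st k = st := by
        unfold ggStepB; rw [if_neg hg]
      rw [hstep] at h ⊢
      obtain ⟨h1, h2⟩ := ih st h
      refine ⟨h1, ?_⟩
      intro k' hk'
      rcases List.mem_cons.mp hk' with rfl | hk''
      · intro ⟨ha, hb⟩
        rw [ha, hb] at hg
        simp at hg
      · exact h2 k' hk''

-- at a stable state every reachable element is already a node
theorem pvSat_complete (ef : PySem.Dict Int (List Int)) (start : Int)
    (reached nodes : PySem.Set Int)
    (hnc : ∀ x, x ∈ nodes ↔ x = start ∨ ∃ k ∈ reached, x ∈ (ef.get? k).getD [])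
    (hstab : ∀ k ∈ ef.keys, k ∈ nodes → k ∈ reached)
    {x : Int} (h : PvRF ef [start] x) : x ∈ nodes := by
  induction h with
  | base y hy =>
    simp at hy
    exact (hnc y).mpr (Or.inl hy)
  | step j y ns _ hg hm ih =>
    have hjk : j ∈ ef.keys := by
      by_contra hjk
      rw [(PySem.Dict.get?_eq_none_iff_not_mem_keys _ _).mpr hjk] at hg
      cases hg
    have hjr : j ∈ reached := hstab j hjk ih
    refine (hnc y).mpr (Or.inr ⟨j, hjr, ?_⟩)
    rw [hg]
    exact hm

-- characterization of B's saturation loop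
theorem pvSatB_char (ef : PySem.Dict Int (List Int)) (start : Int) (n : Nat)
    (reached nodes : PySem.Set Int) (e : Int)
    (hm : ((ef.keys).filter (fun k => !(PySem.Set.contains reached k))).length ≤ n)
    (h : pvGoodB ef start reached nodes e) :
    (ggSatB ef reached nodes e).1.Nodup ∧
    (∀ x, x ∈ (ggSatB ef reached nodes e).1 ↔ PvRF ef [start] x) ∧
    ∃ R : List Int, R.Nodup ∧ (∀ k, k ∈ R ↔ ef.contains k = true ∧ PvRF ef [start] k) ∧
      (ggSatB ef reached nodes e).2 = pvESum ef R := by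
  induction n generalizing reached nodes e with
  | zero =>
    rw [ggSatB]
    have hch : (ggPassB ef ef.keys (reached, nodes, e, false)).2.2.2 = false := by
      by_contra hch
      rw [Bool.not_eq_false] at hch
      rcases pvB_changed_src ef ef.keys (reached, nodes, e, false) hch with h' | ⟨k, hk, h1, h2⟩
      · cases h'
      · have : k ∈ (ef.keys).filter (fun k => !(PySem.Set.contains reached k)) := by
          simp only [List.mem_filter]
          exact ⟨hk, by simp at h1 ⊢; exact h1⟩
        have := List.length_pos_of_mem this
        omega
    rw [dif_neg (by simp [hch])]
    obtain ⟨hpid, hnofire⟩ := pvPassB_stable ef ef.keys (reached, nodes, e, false) hch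
    rw [hpid]
    obtain ⟨hr, hn, hrk, hnc, he⟩ := h
    have hstab : ∀ k ∈ ef.keys, k ∈ nodes → k ∈ reached := by
      intro k hk hkn
      have := hnofire k hk
      by_contra hkr
      exact this ⟨by rw [← PySem.Set.contains_iff] at hkr; simpa using hkr,
        (PySem.Set.contains_iff _ _).mpr hkn⟩
    refine ⟨hn, ?_, reached, hr, ?_, he⟩
    · intro x
      constructor
      · intro hx
        rcases (hnc x).mp hx with rfl | ⟨k0, hk0, hmem⟩
        · exact PvRF.base x (by simp)
        · obtain ⟨hck0, hrfk0⟩ := hrk k0 hk0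
          obtain ⟨ns, hg0⟩ := Option.isSome_iff_exists.mp
            (show (ef.get? k0).isSome = true by
              rw [← PySem.Dict.contains_eq_isSome_get?]; exact hck0)
          rw [hg0] at hmem
          exact PvRF.step k0 x ns hrfk0 hg0 hmem
      · exact pvSat_complete ef start reached nodes hnc hstab
    · intro k
      constructor
      · exact hrk k
      · rintro ⟨hck, hrf⟩
        have hkn : k ∈ nodes := pvSat_complete ef start reached nodes hnc hstab hrf
        exact hstab k ((PySem.Dict.contains_iff_mem_keys _ _).mp hck) hkn
  | succ n ih =>
    rw [ggSatB]
    by_cases hch : (ggPassB ef ef.keys (reached, nodes, e, false)).2.2.2 = true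
    · rw [dif_pos hch]
      have hgood := pvPassB_good ef start ef.keys
        (fun k hk => (PySem.Dict.contains_iff_mem_keys ef k).mpr hk) (reached, nodes, e, false) h
      rcases pvB_changed_src ef ef.keys (reached, nodes, e, false) hch with h' | ⟨k, hk, h1, h2⟩
      · cases h'
      · have hdec : ((ef.keys).filter
            (fun k => !(PySem.Set.contains (ggPassB ef ef.keys (reached, nodes, e, false)).1 k))).length
            < ((ef.keys).filter (fun k => !(PySem.Set.contains reached k))).length := by
          apply pv_filter_lt ef.keys _ _ _ k hk
          · show (!(PySem.Set.contains reached k)) = true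
            have h1' : PySem.Set.contains reached k = false := h1
            rw [h1']; rfl
          · show (!(PySem.Set.contains (ggPassB ef ef.keys (reached, nodes, e, false)).1 k)) = false
            rw [h2]; rfl
          · intro x hx
            simp only [Bool.not_eq_eq_eq_not, Bool.not_true] at hx ⊢
            by_cases hr0 : PySem.Set.contains reached x = true
            · have := pvB_reached_mono ef ef.keys (reached, nodes, e, false) x hr0
              rw [this] at hx; cases hx
            · simpa using hr0
        exact ih _ _ _ (by omega) hgood
    · rw [dif_neg hch]
      rw [Bool.not_eq_true] at hch
      obtain ⟨hpid, hnofire⟩ := pvPassB_stable ef ef.keys (reached, nodes, e, false) hch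
      rw [hpid]
      obtain ⟨hr, hn, hrk, hnc, he⟩ := h
      have hstab : ∀ k ∈ ef.keys, k ∈ nodes → k ∈ reached := by
        intro k hk hkn
        have := hnofire k hk
        by_contra hkr
        exact this ⟨by rw [← PySem.Set.contains_iff] at hkr; simpa using hkr,
          (PySem.Set.contains_iff _ _).mpr hkn⟩
      refine ⟨hn, ?_, reached, hr, ?_, he⟩
      · intro x
        constructor
        · intro hx
          rcases (hnc x).mp hx with rfl | ⟨k0, hk0, hmem⟩
          · exact PvRF.base x (by simp)
          · obtain ⟨hck0, hrfk0⟩ := hrk k0 hk0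
            obtain ⟨ns, hg0⟩ := Option.isSome_iff_exists.mp
              (show (ef.get? k0).isSome = true by
                rw [← PySem.Dict.contains_eq_isSome_get?]; exact hck0)
            rw [hg0] at hmem
            exact PvRF.step k0 x ns hrfk0 hg0 hmem
        · exact pvSat_complete ef start reached nodes hnc hstab
      · intro k
        constructor
        · exact hrk k
        · rintro ⟨hck, hrf⟩
          have hkn : k ∈ nodes := pvSat_complete ef start reached nodes hnc hstab hrf
          exact hstab k ((PySem.Dict.contains_iff_mem_keys _ _).mp hck) hkn

theorem pv_main (edge_frequency : List (Int × List Int)) (start_edge : Int) :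
    get_graph_type edge_frequency start_edge = get_graph_type_alt edge_frequency start_edge := by
  obtain ⟨hAN, hAS, K, hKnd, hKmem, hAc⟩ :=
    pv_loopA_char (1 + pvW (PySem.Dict.mk edge_frequency).items) (PySem.Dict.mk edge_frequency)
      [start_edge] PySem.Set.empty (-1) (by simp) (by simp [PySem.Set.empty])
  have hgood0 : pvGoodB (PySem.Dict.mk edge_frequency) start_edge PySem.Set.empty
      (PySem.Set.add PySem.Set.empty start_edge) 0 := by
    refine ⟨by simp [PySem.Set.empty], PySem.Set.nodup_add _ _ (by simp [PySem.Set.empty]), ?_, ?_, ?_⟩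
    · intro k hk; simp [PySem.Set.empty] at hk
    · intro x
      rw [PySem.Set.mem_add]
      simp [PySem.Set.empty]
    · simp [pvESum, PySem.Set.empty]
  obtain ⟨hBN, hBS, R, hRnd, hRmem, hBe⟩ :=
    pvSatB_char (PySem.Dict.mk edge_frequency) start_edge
      (((PySem.Dict.mk edge_frequency).keys).filter
        (fun k => !(PySem.Set.contains PySem.Set.empty k))).length
      PySem.Set.empty (PySem.Set.add PySem.Set.empty start_edge) 0 (le_refl _) hgood0
  have hpermS :
      ((ggLoopA (PySem.Dict.mk edge_frequency) [start_edge] PySem.Set.empty (-1)).1 : List Int).Perm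
      ((ggSatB (PySem.Dict.mk edge_frequency) PySem.Set.empty
        (PySem.Set.add PySem.Set.empty start_edge) 0).1 : List Int) := by
    refine (List.perm_ext_iff_of_nodup hAN hBN).mpr ?_
    intro x
    rw [hAS x, hBS x]
    simp [PySem.Set.empty]
  have hpermK : K.Perm R :=
    (List.perm_ext_iff_of_nodup hKnd hRnd).mpr (fun k => (hKmem k).trans ((hRmem k).symm))
  have hsum : pvESum (PySem.Dict.mk edge_frequency) K = pvESum (PySem.Dict.mk edge_frequency) R :=
    (hpermK.map _).sum_eq
  have h2 : (ggLoopA (PySem.Dict.mk edge_frequency) [start_edge] PySem.Set.empty (-1)).2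
      = (ggSatB (PySem.Dict.mk edge_frequency) PySem.Set.empty
          (PySem.Set.add PySem.Set.empty start_edge) 0).2 := by
    rw [hAc, hBe, ← hsum]
    simp
  have h1 : PySem.Set.len (ggLoopA (PySem.Dict.mk edge_frequency) [start_edge] PySem.Set.empty (-1)).1
      = PySem.Set.len (ggSatB (PySem.Dict.mk edge_frequency) PySem.Set.empty
          (PySem.Set.add PySem.Set.empty start_edge) 0).1 := by
    unfold PySem.Set.len
    rw [hpermS.length_eq]
  simp only [get_graph_type, get_graph_type_alt]
  rw [h1, h2]

-- ===== VERDICT (by name: the statement is the Claim_ definition above) =====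
theorem get_graph_type_spec : Claim_equal_get_graph_type := by
  intro edge_frequency start_edge _
  exact pv_main edge_frequency start_edge
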